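-- pv_equiv track=rewrite | github.com/2024frank/AI-Microgrant-Research-Oberlin | scripts/normalize_oberlin_localist_events.py | _sessions_overlap_window
-- ===== SOURCE A (Python) =====
-- def _sessions_overlap_window(
--     sessions_a: list[dict], sessions_b: list[dict], window: int
-- ) -> bool:
--     for sa in sessions_a:
--         for sb in sessions_b:
--             a_start = sa.get("startTime") or 0
--             b_start = sb.get("startTime") or 0
--             if abs(a_start - b_start) <= window:
--                 return True
--     return False
-- ===== SOURCE B (Python) =====
-- def _sessions_overlap_window(
--     sessions_a: list[dict], sessions_b: list[dict], window: int
-- ) -> bool: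
--     xs = sorted((s.get("startTime") or 0) for s in sessions_a)
--     ys = sorted((s.get("startTime") or 0) for s in sessions_b)
--     i = j = 0
--     while i < len(xs) and j < len(ys):
--         if abs(xs[i] - ys[j]) <= window:
--             return True
--         if xs[i] <= ys[j]:
--             i += 1
--         else:
--             j += 1
--     return False
-- ===== Notes on version B (the rewrite author's own statement) =====
-- stated objective: alternative
-- what changed: Replaced the nested all-pairs scan by sorting both start-time lists and a two-pointer sweep; worst case drops from O(n*m) to O(n log n + m log m), but A's early exit makes it as fast on typical inputs.
import Mathlib
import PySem

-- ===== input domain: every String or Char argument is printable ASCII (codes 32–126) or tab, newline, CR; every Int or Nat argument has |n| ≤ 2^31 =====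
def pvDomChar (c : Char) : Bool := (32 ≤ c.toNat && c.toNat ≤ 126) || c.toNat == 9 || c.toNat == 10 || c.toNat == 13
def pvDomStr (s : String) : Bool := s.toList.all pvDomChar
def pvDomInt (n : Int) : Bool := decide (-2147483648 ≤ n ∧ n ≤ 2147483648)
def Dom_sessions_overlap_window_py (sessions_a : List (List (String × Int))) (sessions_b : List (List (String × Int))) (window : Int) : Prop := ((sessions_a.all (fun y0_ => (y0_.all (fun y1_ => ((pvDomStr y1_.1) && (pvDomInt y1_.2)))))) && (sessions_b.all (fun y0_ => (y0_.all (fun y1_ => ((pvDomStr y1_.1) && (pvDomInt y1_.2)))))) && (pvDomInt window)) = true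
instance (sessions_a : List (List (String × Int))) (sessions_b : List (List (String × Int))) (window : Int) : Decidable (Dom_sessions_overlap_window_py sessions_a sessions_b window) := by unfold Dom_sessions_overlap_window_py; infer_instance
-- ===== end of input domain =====

-- B replaces A's nested all-pairs scan by sorting both start-time lists and a two-pointer sweep (an alternative algorithm with better worst case; not measured faster here).


-- ===== PORT A =====
-- `s.get("startTime") or 0`: None ↦ 0, and the only falsy Int value 0 ↦ 0, so this is exactly getD … 0
def pvStart (s : List (String × Int)) : Int := PySem.Dict.getD (PySem.Dict.mk s) "startTime" 0

def sessions_overlap_window_py (sessions_a : List (List (String × Int))) (sessions_b : List (List (String × Int))) (window : Int) : Bool :=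
  sessions_a.any (fun sa => sessions_b.any (fun sb =>
    decide (|pvStart sa - pvStart sb| ≤ window)))

-- ===== PORT B =====
-- the two-pointer while loop of Source B, as structural recursion on the two sorted lists
def pvTwoPtr (window : Int) : List Int → List Int → Bool
  | a :: as, b :: bs =>
    if |a - b| ≤ window then true
    else if a ≤ b then pvTwoPtr window as (b :: bs)
    else pvTwoPtr window (a :: as) bs
  | _, _ => false
termination_by xs ys => xs.length + ys.length

def sessions_overlap_window_py_alt (sessions_a : List (List (String × Int))) (sessions_b : List (List (String × Int))) (window : Int) : Bool :=
  pvTwoPtr window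
    (PySem.List.sorted (sessions_a.map pvStart) (fun x => x) false)
    (PySem.List.sorted (sessions_b.map pvStart) (fun x => x) false)

-- ===== PRECONDITION & SPEC =====
def Spec_sessions_overlap_window_py (sessions_a : List (List (String × Int))) (sessions_b : List (List (String × Int))) (window : Int) (out : Bool) : Prop := out = sessions_overlap_window_py_alt sessions_a sessions_b window
instance (sessions_a : List (List (String × Int))) (sessions_b : List (List (String × Int))) (window : Int) (out : Bool) : Decidable (Spec_sessions_overlap_window_py sessions_a sessions_b window out) := by unfold Spec_sessions_overlap_window_py; infer_instance

-- ===== CLAIM (what is proved, stated in full; the proofs are below) =====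
def Claim_equal_sessions_overlap_window_py : Prop := ∀ (sessions_a : List (List (String × Int))) (sessions_b : List (List (String × Int))) (window : Int), Dom_sessions_overlap_window_py sessions_a sessions_b window → Spec_sessions_overlap_window_py sessions_a sessions_b window (sessions_overlap_window_py sessions_a sessions_b window)

-- ===== LEMMAS AND PROOFS =====

-- on two nondecreasing lists, the two-pointer sweep decides the existential
lemma pvTwoPtr_iff (window : Int) :
    ∀ (n : Nat) (xs ys : List Int), xs.length + ys.length ≤ n →
      xs.Pairwise (· ≤ ·) → ys.Pairwise (· ≤ ·) →
      (pvTwoPtr window xs ys = true ↔ ∃ a ∈ xs, ∃ b ∈ ys, |a - b| ≤ window) := by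
  intro n
  induction n with
  | zero =>
    intro xs ys hlen _ _
    match xs, ys with
    | [], [] => simp [pvTwoPtr]
    | [], _ :: _ => simp at hlen
    | _ :: _, _ => simp at hlen
  | succ n ih =>
    intro xs ys hlen hx hy
    match xs, ys with
    | [], _ => simp [pvTwoPtr]
    | _ :: _, [] => simp [pvTwoPtr]
    | a :: as, b :: bs =>
      rw [pvTwoPtr]
      split_ifs with h1 h2
      · simp only [true_iff]
        exact ⟨a, by simp, b, by simp, h1⟩
      · -- a ≤ b and |a - b| > window: a can pair with nothing in b :: bs
        rw [ih as (b :: bs) (by simp at hlen ⊢; omega) hx.tail hy]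
        constructor
        · rintro ⟨x, hxm, y, hym, hxy⟩
          exact ⟨x, List.mem_cons_of_mem _ hxm, y, hym, hxy⟩
        · rintro ⟨x, hxm, y, hym, hxy⟩
          rcases List.mem_cons.1 hxm with rfl | hxm'
          · -- x = a: then b ≤ y, so |a - y| ≥ b - a > window, contradiction
            exfalso
            have hby : b ≤ y := by
              rcases List.mem_cons.1 hym with rfl | hy'
              · exact le_refl _
              · exact (List.pairwise_cons.1 hy).1 y hy'
            have hbx : ¬ (b - x ≤ window) := by
              intro hc; exact h1 (by rw [abs_sub_comm, abs_of_nonneg (by omega)]; exact hc)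
            have habs : |x - y| = y - x := by
              rw [abs_sub_comm, abs_of_nonneg (by omega)]
            omega
          · exact ⟨x, hxm', y, hym, hxy⟩
      · -- b < a and |a - b| > window: b can pair with nothing in a :: as
        rw [ih (a :: as) bs (by simp at hlen ⊢; omega) hx hy.tail]
        constructor
        · rintro ⟨x, hxm, y, hym, hxy⟩
          exact ⟨x, hxm, y, List.mem_cons_of_mem _ hym, hxy⟩
        · rintro ⟨x, hxm, y, hym, hxy⟩
          rcases List.mem_cons.1 hym with rfl | hym'
          · exfalso
            have hax : a ≤ x := by
              rcases List.mem_cons.1 hxm with rfl | hx'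
              · exact le_refl _
              · exact (List.pairwise_cons.1 hx).1 x hx'
            have hay : ¬ (a - y ≤ window) := by
              intro hc; exact h1 (by rw [abs_of_nonneg (by omega)]; exact hc)
            have habs : |x - y| = x - y := by
              rw [abs_of_nonneg (by omega)]
            omega
          · exact ⟨x, hxm, y, hym', hxy⟩

-- A is the decision of the same existential
lemma portA_iff (sessions_a sessions_b : List (List (String × Int))) (window : Int) :
    sessions_overlap_window_py sessions_a sessions_b window = true ↔
      ∃ a ∈ sessions_a.map pvStart, ∃ b ∈ sessions_b.map pvStart, |a - b| ≤ window := by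
  simp [sessions_overlap_window_py, List.any_eq_true]

-- ===== VERDICT (by name: the statement is the Claim_ definition above) =====
theorem sessions_overlap_window_py_spec : Claim_equal_sessions_overlap_window_py := by
  intro sessions_a sessions_b window _
  unfold Spec_sessions_overlap_window_py
  have hB := pvTwoPtr_iff window
      ((PySem.List.sorted (sessions_a.map pvStart) (fun x => x) false).length
        + (PySem.List.sorted (sessions_b.map pvStart) (fun x => x) false).length)
      (PySem.List.sorted (sessions_a.map pvStart) (fun x => x) false)
      (PySem.List.sorted (sessions_b.map pvStart) (fun x => x) false)
      (le_refl _)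
      (PySem.List.sorted_pairwise _ _)
      (PySem.List.sorted_pairwise _ _)
  have hE : (∃ a ∈ PySem.List.sorted (sessions_a.map pvStart) (fun x => x) false,
              ∃ b ∈ PySem.List.sorted (sessions_b.map pvStart) (fun x => x) false,
              |a - b| ≤ window) ↔
            (∃ a ∈ sessions_a.map pvStart, ∃ b ∈ sessions_b.map pvStart, |a - b| ≤ window) := by
    simp [PySem.List.mem_sorted]
  rw [Bool.eq_iff_iff]
  exact (portA_iff sessions_a sessions_b window).trans (hE.symm.trans hB.symm)
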